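-- pv_equiv track=rewrite | github.com/Aarav500/Assembly_line | backend/i-013/app.py | guess_field_spec
-- ===== SOURCE A (Python) =====
-- from typing import List, Dict, Any
--
-- def guess_field_spec(var_name: str) -> Dict[str, Any]:
--     name = var_name.lower()
--     spec = {"name": var_name, "label": var_name.replace("_", " ").title(), "type": "text", "placeholder": "", "default": ""}
--     if any(k in name for k in ["date", "effective", "deadline"]):
--         spec["type"] = "date"
--     elif any(k in name for k in ["email"]):
--         spec["type"] = "email"
--     elif any(k in name for k in ["percent", "percentage"]):
--         spec["type"] = "number"
--         spec["step"] = "0.01"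
--         spec["placeholder"] = "e.g., 99.9"
--     elif any(k in name for k in ["amount", "fee", "price", "rate"]):
--         spec["type"] = "number"
--         spec["step"] = "0.01"
--     elif any(k in name for k in ["days", "hours", "minutes", "term"]):
--         spec["type"] = "number"
--         spec["step"] = "1"
--     elif name.startswith("include_") or name.startswith("has_") or name.startswith("is_") or name.endswith("_enabled"):
--         spec["type"] = "checkbox"
--         spec["default"] = "on"
--     elif any(k in name for k in ["address", "scope", "description", "statement_of_work", "sow", "purpose"]):
--         spec["type"] = "textarea"
--     return spec
-- ===== SOURCE B (Python) =====
-- GROUPS = [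
--     (0, ["date", "effective", "deadline"]),
--     (1, ["email"]),
--     (2, ["percent", "percentage"]),
--     (3, ["amount", "fee", "price", "rate"]),
--     (4, ["days", "hours", "minutes", "term"]),
--     (6, ["address", "scope", "description", "statement_of_work", "sow", "purpose"]),
-- ]
--
-- UPDATES = {
--     0: {"type": "date"},
--     1: {"type": "email"},
--     2: {"type": "number", "step": "0.01", "placeholder": "e.g., 99.9"},
--     3: {"type": "number", "step": "0.01"},
--     4: {"type": "number", "step": "1"},
--     5: {"type": "checkbox", "default": "on"},
--     6: {"type": "textarea"},
--     7: {},
-- }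
--
-- def guess_field_spec(var_name: str):
--     name = var_name.lower()
--     # evaluate ALL rules, collect the priorities of every one that matches,
--     # then pick the strongest (lowest) priority and merge its updates once
--     matched = [p for p, kws in GROUPS if any(k in name for k in kws)]
--     if name.startswith(("include_", "has_", "is_")) or name.endswith("_enabled"):
--         matched.append(5)
--     choice = min(matched, default=7)
--     base = {"name": var_name, "label": var_name.replace("_", " ").title(),
--             "type": "text", "placeholder": "", "default": ""}
--     return {**base, **UPDATES[choice]}
-- ===== Notes on version B (the rewrite author's own statement) =====
-- stated objective: alternative
-- what changed: Instead of a short-circuiting if/elif chain that mutates the dict in the first matching branch, B evaluates every rule, collects the priorities of all matching rules, takes the minimum (with 7 as the no-match default), looks the winner's updates up in a table, and returns the dict merge {**base, **updates}.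
import Mathlib
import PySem

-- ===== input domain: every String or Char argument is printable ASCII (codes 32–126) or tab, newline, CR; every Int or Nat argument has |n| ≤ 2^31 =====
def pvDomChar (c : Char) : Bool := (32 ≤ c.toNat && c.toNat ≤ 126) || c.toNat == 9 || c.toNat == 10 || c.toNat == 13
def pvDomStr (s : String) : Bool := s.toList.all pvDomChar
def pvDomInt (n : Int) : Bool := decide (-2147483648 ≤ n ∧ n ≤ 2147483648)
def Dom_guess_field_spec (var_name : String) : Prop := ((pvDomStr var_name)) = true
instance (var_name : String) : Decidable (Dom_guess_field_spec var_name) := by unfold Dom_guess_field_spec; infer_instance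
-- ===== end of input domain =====

-- B replaces A's short-circuiting if/elif chain by "evaluate all rules, take the minimum matching
-- priority, merge that rule's updates into the base dict" (alternative decomposition; return value proved equal).

-- shared helper: Python str.title(), exact on ASCII (a letter after a cased char is lowered, otherwise uppered)
def pvTitle (cs : List Char) : List Char :=
  (cs.foldl (fun (acc : List Char × Bool) c =>
    if PySem.Chars.isalpha c then
      (acc.1 ++ [if acc.2 then PySem.Chars.lowerChar c else PySem.Chars.upperChar c], true)
    else (acc.1 ++ [c], false)) ([], false)).1

-- ===== PORT A =====
def guess_field_spec (var_name : String) : List (String × String) :=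
  let name := PySem.Str.lower var_name
  let spec : PySem.Dict String String := PySem.Dict.ofList
    [("name", var_name),
     ("label", String.ofList (pvTitle (PySem.Str.replace var_name "_" " ").toList)),
     ("type", "text"), ("placeholder", ""), ("default", "")]
  let spec :=
    if ["date", "effective", "deadline"].any (fun k => PySem.Str.isIn k name) then
      spec.insert "type" "date"
    else if ["email"].any (fun k => PySem.Str.isIn k name) then
      spec.insert "type" "email"
    else if ["percent", "percentage"].any (fun k => PySem.Str.isIn k name) then
      ((spec.insert "type" "number").insert "step" "0.01").insert "placeholder" "e.g., 99.9"
    else if ["amount", "fee", "price", "rate"].any (fun k => PySem.Str.isIn k name) then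
      (spec.insert "type" "number").insert "step" "0.01"
    else if ["days", "hours", "minutes", "term"].any (fun k => PySem.Str.isIn k name) then
      (spec.insert "type" "number").insert "step" "1"
    else if PySem.Str.startswith name "include_" || PySem.Str.startswith name "has_"
         || PySem.Str.startswith name "is_" || PySem.Str.endswith name "_enabled" then
      (spec.insert "type" "checkbox").insert "default" "on"
    else if ["address", "scope", "description", "statement_of_work", "sow", "purpose"].any
              (fun k => PySem.Str.isIn k name) then
      spec.insert "type" "textarea"
    else spec
  spec.items

-- ===== PORT B =====
def pvGroups : List (Nat × List String) :=
  [ (0, ["date", "effective", "deadline"]),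
    (1, ["email"]),
    (2, ["percent", "percentage"]),
    (3, ["amount", "fee", "price", "rate"]),
    (4, ["days", "hours", "minutes", "term"]),
    (6, ["address", "scope", "description", "statement_of_work", "sow", "purpose"]) ]

def pvUpdates : Nat → List (String × String)
  | 0 => [("type", "date")]
  | 1 => [("type", "email")]
  | 2 => [("type", "number"), ("step", "0.01"), ("placeholder", "e.g., 99.9")]
  | 3 => [("type", "number"), ("step", "0.01")]
  | 4 => [("type", "number"), ("step", "1")]
  | 5 => [("type", "checkbox"), ("default", "on")]
  | 6 => [("type", "textarea")]
  | _ => []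

def guess_field_spec_alt (var_name : String) : List (String × String) :=
  let name := PySem.Str.lower var_name
  -- matched = [p for p, kws in GROUPS if any(k in name for k in kws)]
  let matched := (pvGroups.filter (fun g => g.2.any (fun k => PySem.Str.isIn k name))).map Prod.fst
  let matched :=
    if PySem.Str.startswith name "include_" || PySem.Str.startswith name "has_"
       || PySem.Str.startswith name "is_" || PySem.Str.endswith name "_enabled" then
      matched ++ [5]
    else matched
  -- choice = min(matched, default=7)
  let choice := match PySem.List.min? matched (fun x => x) with
    | some m => m
    | none => 7
  let base : PySem.Dict String String := PySem.Dict.ofList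
    [("name", var_name),
     ("label", String.ofList (pvTitle (PySem.Str.replace var_name "_" " ").toList)),
     ("type", "text"), ("placeholder", ""), ("default", "")]
  -- {**base, **UPDATES[choice]}
  ((pvUpdates choice).foldl (fun d kv => d.insert kv.1 kv.2) base).items

-- ===== PRECONDITION & SPEC =====
def Spec_guess_field_spec (var_name : String) (out : List (String × String)) : Prop := out = guess_field_spec_alt var_name
instance (var_name : String) (out : List (String × String)) : Decidable (Spec_guess_field_spec var_name out) := by unfold Spec_guess_field_spec; infer_instance

-- ===== CLAIM (what is proved, stated in full; the proofs are below) =====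
def Claim_equal_guess_field_spec : Prop := ∀ (var_name : String), Dom_guess_field_spec var_name → Spec_guess_field_spec var_name (guess_field_spec var_name)

-- ===== LEMMAS AND PROOFS =====

-- ===== VERDICT (by name: the statement is the Claim_ definition above) =====
set_option maxHeartbeats 1000000 in
theorem guess_field_spec_spec : Claim_equal_guess_field_spec := by
  intro var_name _
  unfold Spec_guess_field_spec guess_field_spec guess_field_spec_alt
  simp only [pvGroups, List.filter_cons, List.filter_nil]
  generalize (["date", "effective", "deadline"].any (fun k => PySem.Str.isIn k (PySem.Str.lower var_name))) = b0
  generalize (["email"].any (fun k => PySem.Str.isIn k (PySem.Str.lower var_name))) = b1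
  generalize (["percent", "percentage"].any (fun k => PySem.Str.isIn k (PySem.Str.lower var_name))) = b2
  generalize (["amount", "fee", "price", "rate"].any (fun k => PySem.Str.isIn k (PySem.Str.lower var_name))) = b3
  generalize (["days", "hours", "minutes", "term"].any (fun k => PySem.Str.isIn k (PySem.Str.lower var_name))) = b4
  generalize (PySem.Str.startswith (PySem.Str.lower var_name) "include_" || PySem.Str.startswith (PySem.Str.lower var_name) "has_"
         || PySem.Str.startswith (PySem.Str.lower var_name) "is_" || PySem.Str.endswith (PySem.Str.lower var_name) "_enabled") = b5
  generalize (["address", "scope", "description", "statement_of_work", "sow", "purpose"].any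
              (fun k => PySem.Str.isIn k (PySem.Str.lower var_name))) = b6
  generalize (PySem.Dict.ofList
    [("name", var_name),
     ("label", String.ofList (pvTitle (PySem.Str.replace var_name "_" " ").toList)),
     ("type", "text"), ("placeholder", ""), ("default", "")] : PySem.Dict String String) = d
  cases b0 <;> cases b1 <;> cases b2 <;> cases b3 <;> cases b4 <;> cases b5 <;> cases b6 <;> rfl
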